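-- pv_equiv track=rewrite | github.com/jingpad-bsp/android_external_autotest | client/common_lib/cros/string_utils.py | join_longest_with_length_limit
-- ===== SOURCE A (Python) =====
-- import bisect
--
-- class StringTooLongError(Exception):
--     """Raised when string is too long to manipulate."""
--
-- def join_longest_with_length_limit(string_list, length_limit, separator=''):
--     """Join strings to meet length limit and yield results.
--
--     Join strings from |string_list| using |separator| and yield the results.
--     Each result string should be as long as possible while still shorter than
--     |length_limit|. In other words, this function yields minimum number of
--     result strings.
--
--     An error will be raised when any stirng in |string_list| is longer than
--     |length_limit| because the result string joined must be longer than
--     |length_limit| in any case.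
--
--     @param string_list: A list of strings to be joined.
--     @param length_limit: The maximum length of the result string.
--     @param separator: The separator to join strings.
--
--     @yield The result string.
--     @throws StringTooLongError when any string in |string_list| is longer than
--         |length_limit|."""
--     # The basic idea is, always select longest string which shorter than length
--     # limit, then update the limit with subtracting the length of selected
--     # string plus separator. Repeat the process until no more strings shorter
--     # than the updated limit. Then yield the result and start next loop.
--
--     string_list = sorted(string_list, key=len)
--     # The length of longest string should shorter than the limit.
--     if len(string_list[-1]) > length_limit:
--         raise StringTooLongError('At least one string is longer than length '
--                                  'limit: %s' % length_limit)
--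
--     length_list = [len(s) for s in string_list]
--     len_sep = len(separator)
--     length_limit += len_sep
--     # Call str.join directly when possible.
--     if sum(length_list) + len_sep * len(string_list) <= length_limit:
--         yield separator.join(string_list)
--         return
--
--     result = ''
--     new_length_limit = length_limit
--     while string_list:
--         index = bisect.bisect_right(length_list,
--                                     new_length_limit - len_sep) - 1
--         if index < 0:  # All available strings are longer than the limit.
--             yield result[:-len_sep]
--             result = ''
--             new_length_limit = length_limit
--             continue
--
--         result = '%s%s%s' % (result, string_list.pop(index), separator)
--         new_length_limit -= length_list.pop(index) + len_sep
--
--     if result: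
--         yield result[:-len_sep]
-- ===== SOURCE B (Python) =====
-- class StringTooLongError(Exception):
--     """Raised when string is too long to manipulate."""
--
-- def join_longest_with_length_limit(string_list, length_limit, separator=''):
--     """Greedily join strings into minimum-count chunks, each at most
--     length_limit long, yielding each chunk.
--
--     Keeps one ascending-sorted working list in place: each round walks it
--     from the top (longest first), moving every string that still fits the
--     shrinking budget into the current chunk and remembering the rest; the
--     walk stops as soon as the budget drops below the shortest remaining
--     string, the processed tail is deleted and the remembered strings are
--     pushed back.  No index search and no per-element pop is needed."""
--     pending = sorted(string_list, key=len)
--     if len(pending[-1]) > length_limit: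
--         raise StringTooLongError('At least one string is longer than length '
--                                  'limit: %s' % length_limit)
--     len_sep = len(separator)
--     if sum(len(s) for s in pending) + len_sep * (len(pending) - 1) <= length_limit:
--         yield separator.join(pending)
--         return
--     while pending:
--         parts = []
--         kept = []
--         budget = length_limit
--         low = len(pending[0])
--         i = len(pending) - 1
--         while i >= 0 and budget >= low:
--             s = pending[i]
--             if len(s) <= budget:
--                 parts.append(s)
--                 budget -= len(s) + len_sep
--             else:
--                 kept.append(s)
--             i -= 1
--         del pending[i + 1:]
--         pending.extend(reversed(kept))
--         yield separator.join(parts)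
-- ===== Notes on version B (the rewrite author's own statement) =====
-- stated objective: faster
-- what changed: Replaces A's per-string bisect-search plus in-place list.pop on a mutated ascending list (and its trailing-separator string slicing) with whole partition rounds over one in-place working list: each round walks it from the longest string down, moves everything that still fits the shrinking budget into the current chunk, stops early once the budget drops below the shortest remaining string, and emits the chunk with a plain separator.join.
-- intended difference: When separator == '' and the strings' total length exceeds length_limit, A's 'result[:-len_sep]' slices with -0 and so yields only empty strings, while B yields the actual greedily joined chunks, which is evidently what the function is for. — e.g. on join_longest_with_length_limit(["ab", "cde", "f"], 3, ""): A returns ["", ""], B returns ["cde", "abf"]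
import Mathlib
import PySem

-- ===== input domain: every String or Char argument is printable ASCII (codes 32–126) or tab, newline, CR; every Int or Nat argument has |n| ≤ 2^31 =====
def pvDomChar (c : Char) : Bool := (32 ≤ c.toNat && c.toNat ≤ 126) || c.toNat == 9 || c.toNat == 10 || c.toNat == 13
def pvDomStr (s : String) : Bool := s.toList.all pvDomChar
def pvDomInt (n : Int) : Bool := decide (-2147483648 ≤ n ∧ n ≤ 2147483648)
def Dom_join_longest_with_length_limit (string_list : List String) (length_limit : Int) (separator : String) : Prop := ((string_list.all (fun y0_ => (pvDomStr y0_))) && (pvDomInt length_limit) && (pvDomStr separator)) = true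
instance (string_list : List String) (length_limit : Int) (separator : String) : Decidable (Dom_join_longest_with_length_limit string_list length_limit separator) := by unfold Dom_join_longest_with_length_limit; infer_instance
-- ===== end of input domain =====

-- B replaces A's bisect+pop on a mutated ascending list by whole linear partition
-- passes over a descending working list (alternative algorithm, same exact chunks);
-- on separator = '' with total length over the limit A's 'result[:-0]' bug yields
-- only empty strings and B yields the real chunks (stated as D_ below).
-- Both A and B are generators; the equivalence is about the yielded list of values.

-- ===== PORT A =====
-- the while-loop of A; fuel only makes the recursion structural (2*len+2 is proved sufficient)
def pvLoopA (sep : String) (len_sep limit : Int) : Nat → List String → List Int → List Char → Int → List String → List String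
  | 0, _, _, _, _, acc => acc
  | fuel+1, strs, lens, result, nll, acc =>
    if strs.isEmpty then
      -- loop exit, then Python's trailing 'if result: yield result[:-len_sep]'
      if result.isEmpty then acc
      else acc ++ [String.ofList (PySem.List.slice result none (some (-len_sep)))]
    else
      let index : Int := ((PySem.List.bisectRight lens (nll - len_sep) : Nat) : Int) - 1
      if index < 0 then
        pvLoopA sep len_sep limit fuel strs lens [] limit
          (acc ++ [String.ofList (PySem.List.slice result none (some (-len_sep)))])
      else
        match PySem.List.pop? strs index, PySem.List.pop? lens index with
        | some (s, strs'), some (l, lens') =>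
          pvLoopA sep len_sep limit fuel strs' lens' (result ++ s.toList ++ sep.toList) (nll - (l + len_sep)) acc
        | _, _ => acc  -- unreachable: index is in range

def join_longest_with_length_limit (string_list : List String) (length_limit : Int) (separator : String) : List String :=
  let sl := PySem.List.sorted string_list (fun s => PySem.Str.len s) false
  match PySem.List.pyGet? sl (-1) with
  | none => []   -- Python: IndexError on the empty list; excluded by Pre_
  | some last =>
    if PySem.Str.len last > length_limit then []   -- Python: raise StringTooLongError; excluded by Pre_
    else
      let length_list := sl.map PySem.Str.len
      let len_sep := PySem.Str.len separator
      let limit := length_limit + len_sep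
      if length_list.sum + len_sep * (sl.length : Int) ≤ limit then
        [PySem.Str.join separator sl]
      else
        pvLoopA separator len_sep limit (2 * sl.length + 2) sl length_list [] limit []

-- ===== PORT B =====
-- one round: walk the reversed (descending) working list; stop as soon as the
-- budget drops below `low`, the length of the shortest remaining string;
-- returns (chunk parts, kept strings in walk order, unprocessed rest)
def pvRoundB (len_sep low : Int) : List String → Int → List String × List String × List String
  | [], _ => ([], [], [])
  | s :: rest, budget =>
    if budget < low then ([], [], s :: rest)
    else if PySem.Str.len s ≤ budget then
      let r := pvRoundB len_sep low rest (budget - (PySem.Str.len s + len_sep))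
      (s :: r.1, r.2.1, r.2.2)
    else
      let r := pvRoundB len_sep low rest budget
      (r.1, s :: r.2.1, r.2.2)

-- B's while-loop over rounds; 'del pending[i+1:]; pending.extend(reversed(kept))'
-- is the list reassembly below; fuel (the initial list length) only makes it structural
def pvLoopB (sep : String) (len_sep length_limit : Int) : Nat → List String → List String → List String
  | 0, _, acc => acc
  | fuel+1, pending, acc =>
    if pending.isEmpty then acc
    else
      let low := PySem.Str.len (pending.head?.getD "")  -- len(pending[0]): in range, the loop guard gives pending ≠ []
      let r := pvRoundB len_sep low pending.reverse length_limit
      pvLoopB sep len_sep length_limit fuel (r.2.2.reverse ++ r.2.1.reverse)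
        (acc ++ [PySem.Str.join sep r.1])

def join_longest_with_length_limit_alt (string_list : List String) (length_limit : Int) (separator : String) : List String :=
  let pending := PySem.List.sorted string_list (fun s => PySem.Str.len s) false
  match PySem.List.pyGet? pending (-1) with
  | none => []   -- IndexError on the empty list; excluded by Pre_
  | some last =>
    if PySem.Str.len last > length_limit then []   -- raise StringTooLongError; excluded by Pre_
    else
      let len_sep := PySem.Str.len separator
      if (pending.map PySem.Str.len).sum + len_sep * ((pending.length : Int) - 1) ≤ length_limit then
        [PySem.Str.join separator pending]
      else
        pvLoopB separator len_sep length_limit pending.length pending []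

-- ===== PRECONDITION & SPEC =====
-- Pre_ excludes exactly the inputs where Python A raises: the empty list (IndexError)
-- and lists containing a string longer than length_limit (StringTooLongError).
def Pre_join_longest_with_length_limit (string_list : List String) (length_limit : Int) (separator : String) : Prop :=
  string_list ≠ [] ∧ ∀ s ∈ string_list, PySem.Str.len s ≤ length_limit
instance (string_list : List String) (length_limit : Int) (separator : String) : Decidable (Pre_join_longest_with_length_limit string_list length_limit separator) := by unfold Pre_join_longest_with_length_limit; infer_instance

def pvWitness_join_longest_with_length_limit : List String × Int × String := (["ab", "c"], 2, ",")

-- When separator = '' and the total length of the strings exceeds length_limit, A's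
-- 'result[:-len_sep]' slices with -0 and so A yields only empty strings, while B yields
-- the actual greedily joined chunks, which is evidently the intended value.
def D_join_longest_with_length_limit (string_list : List String) (length_limit : Int) (separator : String) : Prop :=
  separator = "" ∧ length_limit < (string_list.map PySem.Str.len).sum
instance (string_list : List String) (length_limit : Int) (separator : String) : Decidable (D_join_longest_with_length_limit string_list length_limit separator) := by unfold D_join_longest_with_length_limit; infer_instance

def Spec_join_longest_with_length_limit (string_list : List String) (length_limit : Int) (separator : String) (out : List String) : Prop := ¬ D_join_longest_with_length_limit string_list length_limit separator → out = join_longest_with_length_limit_alt string_list length_limit separator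
instance (string_list : List String) (length_limit : Int) (separator : String) (out : List String) : Decidable (Spec_join_longest_with_length_limit string_list length_limit separator out) := by unfold Spec_join_longest_with_length_limit; infer_instance

def pvDiffWitness_join_longest_with_length_limit : List String × Int × String := (["ab", "cde", "f"], 3, "")
def pvDiffWitnessOut_join_longest_with_length_limit : (List String) × (List String) := (["", ""], ["cde", "abf"])

-- ===== CLAIM (what is proved, stated in full; the proofs are below) =====
def Claim_unchanged_join_longest_with_length_limit : Prop := ∀ (string_list : List String) (length_limit : Int) (separator : String), Dom_join_longest_with_length_limit string_list length_limit separator → Pre_join_longest_with_length_limit string_list length_limit separator → Spec_join_longest_with_length_limit string_list length_limit separator (join_longest_with_length_limit string_list length_limit separator)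
def Claim_changed_join_longest_with_length_limit : Prop := Dom_join_longest_with_length_limit (pvDiffWitness_join_longest_with_length_limit.1) (pvDiffWitness_join_longest_with_length_limit.2.1) (pvDiffWitness_join_longest_with_length_limit.2.2) ∧ Pre_join_longest_with_length_limit (pvDiffWitness_join_longest_with_length_limit.1) (pvDiffWitness_join_longest_with_length_limit.2.1) (pvDiffWitness_join_longest_with_length_limit.2.2) ∧ D_join_longest_with_length_limit (pvDiffWitness_join_longest_with_length_limit.1) (pvDiffWitness_join_longest_with_length_limit.2.1) (pvDiffWitness_join_longest_with_length_limit.2.2) ∧ join_longest_with_length_limit (pvDiffWitness_join_longest_with_length_limit.1) (pvDiffWitness_join_longest_with_length_limit.2.1) (pvDiffWitness_join_longest_with_length_limit.2.2) = pvDiffWitnessOut_join_longest_with_length_limit.1 ∧ join_longest_with_length_limit_alt (pvDiffWitness_join_longest_with_length_limit.1) (pvDiffWitness_join_longest_with_length_limit.2.1) (pvDiffWitness_join_longest_with_length_limit.2.2) = pvDiffWitnessOut_join_longest_with_length_limit.2 ∧ pvDiffWitnessOut_join_longest_with_length_limit.1 ≠ pvDiffWitnessOut_join_longest_with_length_lim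it.2
def Claim_exact_join_longest_with_length_limit : Prop := ∀ (string_list : List String) (length_limit : Int) (separator : String), Dom_join_longest_with_length_limit string_list length_limit separator → Pre_join_longest_with_length_limit string_list length_limit separator → D_join_longest_with_length_limit string_list length_limit separator → join_longest_with_length_limit string_list length_limit separator ≠ join_longest_with_length_limit_alt string_list length_limit separator

-- ===== LEMMAS AND PROOFS =====

-- the plain partition pass (no early break): the reference chunk computation
def pvChunkB (len_sep : Int) : List String → Int → List String × List String
  | [], _ => ([], [])
  | s :: rest, budget =>
    if PySem.Str.len s ≤ budget then
      let r := pvChunkB len_sep rest (budget - (PySem.Str.len s + len_sep))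
      (s :: r.1, r.2)
    else
      let r := pvChunkB len_sep rest budget
      (r.1, s :: r.2)

-- reference description of the rounds: the list of chunk part-lists
def pvRef (len_sep length_limit : Int) : Nat → List String → List (List String)
  | 0, _ => []
  | fuel+1, pending =>
    if pending.isEmpty then []
    else (pvChunkB len_sep pending length_limit).1 ::
      pvRef len_sep length_limit fuel (pvChunkB len_sep pending length_limit).2

-- A's accumulated result string for the taken parts (each part followed by the separator)
def pvFlat (sep : String) (ps : List String) : List Char := (ps.map (fun s => s.toList ++ sep.toList)).flatten
-- what one A-yield produces from the taken parts
def pvG (sep : String) (len_sep : Int) (ps : List String) : String :=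
  String.ofList (PySem.List.slice (pvFlat sep ps) none (some (-len_sep)))
-- A's remaining output from a mid-round state (pending strings, parts already taken, remaining budget)
def pvTail (len_sep length_limit : Int) (pending parts : List String) (budget : Int) : List (List String) :=
  if pending.isEmpty then (if parts.isEmpty then [] else [parts])
  else (parts ++ (pvChunkB len_sep pending budget).1) ::
    pvRef len_sep length_limit pending.length (pvChunkB len_sep pending budget).2

theorem pvChunkB_len (k : Int) (p : List String) : ∀ b,
    (pvChunkB k p b).1.length + (pvChunkB k p b).2.length = p.length := by
  induction p with
  | nil => intro b; simp [pvChunkB]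
  | cons s rest ih =>
    intro b; simp only [pvChunkB]; split_ifs with h
    · have h1 := ih (b - (PySem.Str.len s + k)); simp at h1 ⊢; omega
    · have h1 := ih b; simp at h1 ⊢; omega

theorem pvChunkB_kept_sublist (k : Int) (p : List String) : ∀ b,
    (pvChunkB k p b).2.Sublist p := by
  induction p with
  | nil => intro b; simp [pvChunkB]
  | cons s rest ih =>
    intro b; simp only [pvChunkB]; split_ifs
    · exact (ih _).cons s
    · exact (ih _).cons₂ s

theorem pvChunkB_nofit (k : Int) (p : List String) (b : Int)
    (h : ∀ s ∈ p, b < PySem.Str.len s) : pvChunkB k p b = ([], p) := by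
  induction p with
  | nil => simp [pvChunkB]
  | cons s rest ih =>
    have h1 := h s (by simp)
    simp only [pvChunkB, if_neg (by omega : ¬ PySem.Str.len s ≤ b)]
    rw [ih (fun x hx => h x (by simp [hx]))]

theorem pvChunkB_skip (k : Int) (u : List String) (b : Int)
    (h : ∀ s ∈ u, b < PySem.Str.len s) : ∀ v,
    pvChunkB k (u ++ v) b = ((pvChunkB k v b).1, u ++ (pvChunkB k v b).2) := by
  induction u with
  | nil => intro v; simp
  | cons s rest ih =>
    intro v
    have h1 := h s (by simp)
    simp only [List.cons_append, pvChunkB, if_neg (by omega : ¬ PySem.Str.len s ≤ b)]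
    rw [ih (fun x hx => h x (by simp [hx]))]

theorem pvRef_nil (k L : Int) (f : Nat) : pvRef k L f [] = [] := by
  cases f <;> simp [pvRef]

theorem pvRef_fuel (k L : Int) : ∀ (f1 : Nat) (p : List String) (f2 : Nat),
    (∀ s ∈ p, PySem.Str.len s ≤ L) → p.length ≤ f1 → p.length ≤ f2 →
    pvRef k L f1 p = pvRef k L f2 p := by
  intro f1
  induction f1 with
  | zero => intro p f2 hfit h1 h2
            have : p = [] := List.length_eq_zero_iff.mp (Nat.le_zero.mp h1)
            subst this; rw [pvRef_nil, pvRef_nil]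
  | succ f ihf =>
    intro p f2 hfit h1 h2
    match p, f2 with
    | [], f2 => rw [pvRef_nil, pvRef_nil]
    | s :: rest, f2+1 =>
      simp only [pvRef, List.isEmpty_cons]
      have hhead : PySem.Str.len s ≤ L := hfit s (by simp)
      have hfirst : (pvChunkB k (s :: rest) L).1 = s :: (pvChunkB k rest (L - (PySem.Str.len s + k))).1 := by
        have : ((s.length:Int)) ≤ L := by simpa using hhead
        simp [pvChunkB, this]
      have hlen := pvChunkB_len k (s :: rest) L
      have hkl : (pvChunkB k (s :: rest) L).2.length ≤ rest.length := by
        rw [hfirst] at hlen; simp at hlen; omega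
      have hmem : ∀ x ∈ (pvChunkB k (s :: rest) L).2, PySem.Str.len x ≤ L :=
        fun x hx => hfit x ((pvChunkB_kept_sublist k (s :: rest) L).mem hx)
      simp only [Bool.false_eq_true, if_false]
      congr 1
      exact ihf _ _ hmem (by simp at h1; omega) (by simp at h2; omega)

-- reference round loop over the descending list (rounds = plain partition passes)
def pvLoopRef (sep : String) (len_sep length_limit : Int) : Nat → List String → List String → List String
  | 0, _, acc => acc
  | fuel+1, pending, acc =>
    if pending.isEmpty then acc
    else
      let r := pvChunkB len_sep pending length_limit
      pvLoopRef sep len_sep length_limit fuel r.2 (acc ++ [PySem.Str.join sep r.1])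

theorem pvLoopRef_eq (sep : String) (k L : Int) : ∀ (fuel : Nat) (pending acc : List String),
    pvLoopRef sep k L fuel pending acc = acc ++ (pvRef k L fuel pending).map (PySem.Str.join sep) := by
  intro fuel
  induction fuel with
  | zero => intro pending acc; simp [pvLoopRef, pvRef]
  | succ f ih =>
    intro pending acc
    simp only [pvLoopRef, pvRef]
    split_ifs with h
    · simp
    · rw [ih]; simp

-- the early-break round computes the same chunk, and kept ++ rest is the plain pass's kept list
theorem pvRoundB_eq_chunkB (k low : Int) : ∀ (p : List String) (b : Int),
    (∀ x ∈ p, low ≤ PySem.Str.len x) →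
    (pvRoundB k low p b).1 = (pvChunkB k p b).1 ∧
      (pvRoundB k low p b).2.1 ++ (pvRoundB k low p b).2.2 = (pvChunkB k p b).2 := by
  intro p
  induction p with
  | nil => intro b _; simp [pvRoundB, pvChunkB]
  | cons s rest ih =>
    intro b hlow
    by_cases hbr : b < low
    · have hnofit : ∀ x ∈ s :: rest, b < PySem.Str.len x :=
        fun x hx => lt_of_lt_of_le hbr (hlow x hx)
      rw [pvChunkB_nofit k (s :: rest) b hnofit]
      simp [pvRoundB, if_pos hbr]
    · have hlow' : ∀ x ∈ rest, low ≤ PySem.Str.len x := fun x hx => hlow x (by simp [hx])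
      by_cases hfit : PySem.Str.len s ≤ b
      · have h' : ((s.length : Int)) ≤ b := by simpa using hfit
        obtain ⟨ih1, ih2⟩ := ih (b - (PySem.Str.len s + k)) hlow'
        constructor
        · simp only [pvRoundB, if_neg hbr, if_pos hfit, pvChunkB, if_pos h']
          simpa using ih1
        · simp only [pvRoundB, if_neg hbr, if_pos hfit, pvChunkB, if_pos h']
          simpa using ih2
      · have h' : ¬ ((s.length : Int)) ≤ b := by simpa using hfit
        obtain ⟨ih1, ih2⟩ := ih b hlow'
        constructor
        · simp only [pvRoundB, if_neg hbr, if_neg hfit, pvChunkB, if_neg h']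
          simpa using ih1
        · simp only [pvRoundB, if_neg hbr, if_neg hfit, pvChunkB, if_neg h']
          simpa using ih2

-- B's in-place loop over the ascending list equals the reference loop over the descending list
theorem pvLoopB_eq_ref (sep : String) (k L : Int) : ∀ (fuel : Nat) (asc acc : List String),
    asc.Pairwise (fun a b => PySem.Str.len a ≤ PySem.Str.len b) →
    pvLoopB sep k L fuel asc acc = pvLoopRef sep k L fuel asc.reverse acc := by
  intro fuel
  induction fuel with
  | zero => intro asc acc _; simp [pvLoopB, pvLoopRef]
  | succ f ih =>
    intro asc acc hasc
    cases hasc0 : asc with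
    | nil => simp [pvLoopB, pvLoopRef]
    | cons a0 t =>
      rw [← hasc0]
      have hne : asc ≠ [] := by rw [hasc0]; simp
      have hemp : asc.isEmpty = false := by simp [List.isEmpty_eq_false_iff, hne]
      have hempr : asc.reverse.isEmpty = false := by
        simp only [List.isEmpty_eq_false_iff]
        simpa using hne
      simp only [pvLoopB, pvLoopRef, hemp, hempr, Bool.false_eq_true, if_false]
      have hlow : ∀ x ∈ asc.reverse, PySem.Str.len (asc.head?.getD "") ≤ PySem.Str.len x := by
        have hhead : asc.head?.getD "" = a0 := by rw [hasc0]; rfl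
        rw [hhead]
        intro x hx
        rw [List.mem_reverse, hasc0] at hx
        rcases List.mem_cons.mp hx with rfl | hx'
        · exact le_refl _
        · exact (List.pairwise_cons.mp (hasc0 ▸ hasc)).1 x hx'
      obtain ⟨hb1, hb2⟩ := pvRoundB_eq_chunkB k (PySem.Str.len (asc.head?.getD "")) asc.reverse L hlow
      rw [hb1]
      have hnext : ((pvRoundB k (PySem.Str.len (asc.head?.getD "")) asc.reverse L).2.2.reverse
          ++ (pvRoundB k (PySem.Str.len (asc.head?.getD "")) asc.reverse L).2.1.reverse)
          = (pvChunkB k asc.reverse L).2.reverse := by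
        rw [← hb2, List.reverse_append]
      rw [hnext]
      rw [ih ((pvChunkB k asc.reverse L).2.reverse) _ (by
        rw [List.pairwise_reverse]
        have hdesc : asc.reverse.Pairwise (fun a b => PySem.Str.len b ≤ PySem.Str.len a) := by
          rw [List.pairwise_reverse]
          exact hasc
        exact hdesc.sublist (pvChunkB_kept_sublist k asc.reverse L))]
      rw [List.reverse_reverse]

theorem pvFirstFit (b : Int) : ∀ (p : List String), (∃ s ∈ p, PySem.Str.len s ≤ b) →
    ∃ u s0 w, p = u ++ s0 :: w ∧ (∀ s ∈ u, b < PySem.Str.len s) ∧ PySem.Str.len s0 ≤ b := by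
  intro p
  induction p with
  | nil => simp
  | cons s rest ih =>
    intro h
    by_cases hs : PySem.Str.len s ≤ b
    · exact ⟨[], s, rest, by simp, by simp, hs⟩
    · obtain ⟨x, hx, hxb⟩ := h
      rcases List.mem_cons.mp hx with rfl | hx'
      · omega
      · obtain ⟨u, s0, w, hp, hu, hs0⟩ := ih ⟨x, hx', hxb⟩
        exact ⟨s :: u, s0, w, by simp [hp], by
          intro y hy; rcases List.mem_cons.mp hy with rfl | hy'
          · omega
          · exact hu y hy', hs0⟩

theorem pvFlat_eq_nil_iff (sep : String) (hk : sep ≠ "") (ps : List String) :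
    pvFlat sep ps = [] ↔ ps = [] := by
  constructor
  · intro h
    cases ps with
    | nil => rfl
    | cons a r =>
      exfalso
      simp [pvFlat] at h
      apply hk
      tauto
  · intro h; subst h; simp [pvFlat]

theorem pvFlat_eq_join_append (sep : String) : ∀ (a : String) (r : List String),
    pvFlat sep (a :: r) = PySem.Chars.join sep.toList ((a :: r).map String.toList) ++ sep.toList := by
  intro a r
  induction r generalizing a with
  | nil => simp [pvFlat, PySem.Chars.join_singleton]
  | cons b r ih =>
    have : pvFlat sep (a :: b :: r) = a.toList ++ sep.toList ++ pvFlat sep (b :: r) := by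
      simp [pvFlat]
    rw [this, ih b]
    rw [show List.map String.toList (a :: b :: r) = a.toList :: b.toList :: List.map String.toList r from rfl,
        PySem.Chars.join_cons_cons sep.toList a.toList b.toList (r.map String.toList)]
    simp

theorem pvG_eq_join (sep : String) (hk : sep ≠ "") (ps : List String) :
    pvG sep (PySem.Str.len sep) ps = PySem.Str.join sep ps := by
  have hpos : 0 < sep.toList.length := List.length_pos_iff.mpr (by simpa [String.toList_eq_nil_iff] using hk)
  cases ps with
  | nil =>
    have : PySem.Str.join sep [] = "" := by
      have := PySem.Str.toList_join sep []
      rw [List.map_nil, PySem.Chars.join_nil] at this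
      rw [← String.ofList_toList (s := PySem.Str.join sep []), this]
    rw [this]
    simp [pvG, pvFlat, PySem.List.slice]
  | cons a r =>
    rw [← String.ofList_toList (s := PySem.Str.join sep (a :: r)), PySem.Str.toList_join]
    unfold pvG
    congr 1
    rw [pvFlat_eq_join_append, PySem.Str.len_eq, PySem.List.slice_to_neg_natCast _ _ hpos]
    rw [List.length_append, Nat.add_sub_cancel]
    exact List.take_left' rfl

theorem pvSliceZero (result : List Char) :
    String.ofList (PySem.List.slice result none (some (-(0:Int)))) = "" := by
  rw [neg_zero, PySem.List.slice_to result (by omega)]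
  simp

theorem pvLoopA_empty_sep (sep : String) (limit : Int) :
    ∀ (fuel : Nat) (strs : List String) (lens : List Int) (result : List Char) (nll : Int) (acc : List String),
    ∃ m, pvLoopA sep 0 limit fuel strs lens result nll acc = acc ++ List.replicate m "" := by
  intro fuel
  induction fuel with
  | zero => intro strs lens result nll acc; exact ⟨0, by simp [pvLoopA]⟩
  | succ f ih =>
    intro strs lens result nll acc
    simp only [pvLoopA]
    split_ifs with h1 h2 h3
    · exact ⟨0, by simp⟩
    · exact ⟨1, by rw [pvSliceZero]; simp⟩
    · obtain ⟨m, hm⟩ := ih strs lens [] limit (acc ++ [String.ofList (PySem.List.slice result none (some (-(0:Int))))])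
      refine ⟨m + 1, ?_⟩
      rw [hm, pvSliceZero]
      simp [List.replicate_succ, List.append_assoc]
    · match hp : PySem.List.pop? strs (((PySem.List.bisectRight lens (nll - 0) : Nat) : Int) - 1),
            hq : PySem.List.pop? lens (((PySem.List.bisectRight lens (nll - 0) : Nat) : Int) - 1) with
      | some (s, strs'), some (l, lens') =>
        obtain ⟨m, hm⟩ := ih strs' lens' (result ++ s.toList ++ sep.toList) (nll - (l + 0)) acc
        exact ⟨m, hm⟩
      | some (s, strs'), none => exact ⟨0, by simp⟩
      | none, _ => exact ⟨0, by simp⟩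

theorem pvBisect_nofit (lens : List Int) (b : Int) (hpair : lens.Pairwise (· ≤ ·))
    (h : ∀ x ∈ lens, b < x) : PySem.List.bisectRight lens b = 0 := by
  obtain ⟨h1, h2, h3⟩ := PySem.List.bisectRight_spec lens b hpair
  by_contra hne
  have hpos : 0 < PySem.List.bisectRight lens b := Nat.pos_of_ne_zero hne
  have hlen : 0 < lens.length := lt_of_lt_of_le hpos h1
  exact absurd (h2 0 hlen hpos) (not_le.mpr (h _ (List.getElem_mem hlen)))

theorem pvBisect_fit (a c : List Int) (s0 b : Int) (hpair : (a ++ s0 :: c).Pairwise (· ≤ ·))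
    (hs0 : s0 ≤ b) (hc : ∀ x ∈ c, b < x) :
    PySem.List.bisectRight (a ++ s0 :: c) b = a.length + 1 := by
  obtain ⟨h1, h2, h3⟩ := PySem.List.bisectRight_spec (a ++ s0 :: c) b hpair
  have hlen : (a ++ s0 :: c).length = a.length + 1 + c.length := by simp; omega
  have hmid : a.length < (a ++ s0 :: c).length := by omega
  have hgetmid : (a ++ s0 :: c)[a.length] = s0 := by
    rw [List.getElem_append_right (le_refl a.length)]
    simp
  by_contra hne
  rcases Nat.lt_or_ge (PySem.List.bisectRight (a ++ s0 :: c) b) (a.length + 1) with hlt | hge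
  · have := h3 a.length hmid (by omega)
    rw [hgetmid] at this; omega
  · have hge2 : a.length + 2 ≤ PySem.List.bisectRight (a ++ s0 :: c) b := by omega
    cases c with
    | nil =>
      have hl2 : (a ++ [s0]).length = a.length + 1 := by simp
      omega
    | cons c0 c' =>
      have hsplit : a ++ s0 :: c0 :: c' = (a ++ [s0]) ++ c0 :: c' := by simp
      have hj : a.length + 1 < (a ++ s0 :: c0 :: c').length := by simp
      have hget : (a ++ s0 :: c0 :: c')[a.length + 1] = c0 := by
        rw [List.getElem_of_eq hsplit hj,
            List.getElem_append_right (by simp)]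
        simp
      have := h2 (a.length + 1) hj (by omega)
      rw [hget] at this
      exact absurd this (not_le.mpr (hc c0 (by simp)))

theorem pvTail_nil (k L : Int) (parts : List String) (b : Int) :
    pvTail k L [] parts b = if parts.isEmpty then [] else [parts] := by
  simp [pvTail]

theorem pvTail_cons (k L : Int) (p parts : List String) (b : Int) (hp : p ≠ []) :
    pvTail k L p parts b = (parts ++ (pvChunkB k p b).1) :: pvRef k L p.length (pvChunkB k p b).2 := by
  rw [pvTail, if_neg (by simpa [List.isEmpty_iff] using hp)]

theorem pvLenNonneg (s : String) : 0 ≤ PySem.Str.len s := by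
  rw [PySem.Str.len_eq]; positivity

theorem pvChunkB_first (k : Int) (s0 : String) (w : List String) (b : Int) (h : PySem.Str.len s0 ≤ b) :
    pvChunkB k (s0 :: w) b = (s0 :: (pvChunkB k w (b - (PySem.Str.len s0 + k))).1,
      (pvChunkB k w (b - (PySem.Str.len s0 + k))).2) := by
  have h' : ((s0.length : Int)) ≤ b := by simpa using h
  simp [pvChunkB, h']

theorem pvRef_step (k L : Int) (p : List String) (hp : p ≠ [])
    (hfit : ∀ s ∈ p, PySem.Str.len s ≤ L) (f : Nat) (hf : p.length ≤ f) :
    pvRef k L f p = (pvChunkB k p L).1 :: pvRef k L f (pvChunkB k p L).2 := by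
  cases p with
  | nil => exact absurd rfl hp
  | cons p0 rest =>
    cases f with
    | zero => simp at hf
    | succ f' =>
      have hkept_fit : ∀ x ∈ (pvChunkB k (p0 :: rest) L).2, PySem.Str.len x ≤ L :=
        fun x hx => hfit x ((pvChunkB_kept_sublist k (p0 :: rest) L).mem hx)
      have hkl : (pvChunkB k (p0 :: rest) L).2.length ≤ f' := by
        have hlen := pvChunkB_len k (p0 :: rest) L
        have h1 : 1 ≤ (pvChunkB k (p0 :: rest) L).1.length := by
          rw [pvChunkB_first k p0 rest L (hfit p0 (by simp))]; simp
        simp at hf hlen; omega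
      rw [pvRef_fuel k L (f' + 1) (pvChunkB k (p0 :: rest) L).2 f' hkept_fit (by omega) hkl]
      simp only [pvRef, List.isEmpty_cons, Bool.false_eq_true, if_false]

theorem pvMaster (sep : String) (L : Int) (hk : 1 ≤ PySem.Str.len sep) :
    ∀ (fuel : Nat) (pending parts : List String) (budget : Int) (acc : List String),
    pending.Pairwise (fun a b => PySem.Str.len b ≤ PySem.Str.len a) →
    (∀ s ∈ pending, PySem.Str.len s ≤ L) →
    (parts = [] → budget = L) →
    2 * pending.length + 1 + (if parts = [] then 0 else 1) ≤ fuel →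
    pvLoopA sep (PySem.Str.len sep) (L + PySem.Str.len sep) fuel
        pending.reverse ((pending.map PySem.Str.len).reverse) (pvFlat sep parts)
        (budget + PySem.Str.len sep) acc
      = acc ++ (pvTail (PySem.Str.len sep) L pending parts budget).map (pvG sep (PySem.Str.len sep)) := by
  have hsep : sep ≠ "" := by
    intro e; subst e; simp [PySem.Str.len_eq] at hk
  intro fuel
  induction fuel with
  | zero => intro pending parts budget acc _ _ _ hfuel; split_ifs at hfuel <;> omega
  | succ f ih =>
    intro pending parts budget acc hdesc hfit hstart hfuel
    by_cases hpd : pending = []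
    · subst hpd
      by_cases hparts : parts = []
      · subst hparts
        simp [pvLoopA, pvTail, pvFlat]
      · have h1 : (pvFlat sep parts).isEmpty = false := by
          simp only [List.isEmpty_eq_false_iff]
          exact (pvFlat_eq_nil_iff sep hsep parts).not.mpr hparts
        have h2 : parts.isEmpty = false := by simp [List.isEmpty_eq_false_iff, hparts]
        simp [pvLoopA, pvTail, h1, h2, pvG]
    · have hemp : pending.reverse.isEmpty = false := by
        simp [List.isEmpty_iff, hpd]
      simp only [pvLoopA, hemp, Bool.false_eq_true, if_false]
      rw [show budget + PySem.Str.len sep - PySem.Str.len sep = budget from by ring]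
      have hpair : ((pending.map PySem.Str.len).reverse).Pairwise (· ≤ ·) := by
        rw [List.pairwise_reverse]
        exact (List.pairwise_map).mpr hdesc
      by_cases hex : ∃ s ∈ pending, PySem.Str.len s ≤ budget
      · -- some string fits: A pops the longest fitting one, the first fit of the descending list
        obtain ⟨u, s0, w, hp, hu, hs0⟩ := pvFirstFit budget pending hex
        have hsplit : (pending.map PySem.Str.len).reverse
            = (w.map PySem.Str.len).reverse ++ PySem.Str.len s0 :: (u.map PySem.Str.len).reverse := by
          rw [hp]; simp
        have hcu : ∀ x ∈ (u.map PySem.Str.len).reverse, budget < x := by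
          intro x hx
          rw [List.mem_reverse, List.mem_map] at hx
          obtain ⟨s, hs, rfl⟩ := hx
          exact hu s hs
        have hbis : PySem.List.bisectRight ((pending.map PySem.Str.len).reverse) budget = w.length + 1 := by
          rw [hsplit]
          have := pvBisect_fit ((w.map PySem.Str.len).reverse) ((u.map PySem.Str.len).reverse)
            (PySem.Str.len s0) budget (hsplit ▸ hpair) hs0 hcu
          simpa using this
        rw [hbis]
        rw [if_neg (by push_cast; omega : ¬ (((w.length + 1 : Nat) : Int) - 1 < 0))]
        have hidx : ((w.length + 1 : Nat) : Int) - 1 = ((w.length : Nat) : Int) := by push_cast; ring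
        rw [hidx]
        have hrev : pending.reverse = w.reverse ++ s0 :: u.reverse := by rw [hp]; simp
        have hpop1 : PySem.List.pop? pending.reverse ((w.length : Nat) : Int)
            = some (s0, (u ++ w).reverse) := by
          rw [hrev, PySem.List.pop?_natCast _ _ (by simp only [List.length_append, List.length_reverse, List.length_cons, List.length_map]; omega)]
          have hget : (w.reverse ++ s0 :: u.reverse)[w.length]'(by simp only [List.length_append, List.length_reverse, List.length_cons, List.length_map]; omega) = s0 := by
            rw [List.getElem_append_right (by simp)]
            simp
          have hera : (w.reverse ++ s0 :: u.reverse).eraseIdx w.length = (u ++ w).reverse := by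
            rw [List.eraseIdx_append_of_length_le (by simp)]
            simp
          rw [hget, hera]
        have hpop2 : PySem.List.pop? ((pending.map PySem.Str.len).reverse) ((w.length : Nat) : Int)
            = some (PySem.Str.len s0, ((u ++ w).map PySem.Str.len).reverse) := by
          rw [hsplit, PySem.List.pop?_natCast _ _ (by simp only [List.length_append, List.length_reverse, List.length_cons, List.length_map]; omega)]
          have hget : ((w.map PySem.Str.len).reverse ++ PySem.Str.len s0 :: (u.map PySem.Str.len).reverse)[w.length]'(by simp only [List.length_append, List.length_reverse, List.length_cons, List.length_map]; omega)
              = PySem.Str.len s0 := by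
            rw [List.getElem_append_right (by simp)]
            simp
          have hera : ((w.map PySem.Str.len).reverse ++ PySem.Str.len s0 :: (u.map PySem.Str.len).reverse).eraseIdx w.length
              = ((u ++ w).map PySem.Str.len).reverse := by
            rw [List.eraseIdx_append_of_length_le (by simp)]
            simp
          rw [hget, hera]
        simp only [hpop1, hpop2]
        have hflatstep : pvFlat sep parts ++ s0.toList ++ sep.toList = pvFlat sep (parts ++ [s0]) := by
          simp [pvFlat]
        have hnll : budget + PySem.Str.len sep - (PySem.Str.len s0 + PySem.Str.len sep)
            = (budget - (PySem.Str.len s0 + PySem.Str.len sep)) + PySem.Str.len sep := by ring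
        rw [hflatstep, hnll]
        have hlp : pending.length = u.length + 1 + w.length := by rw [hp]; simp; omega
        have hsub : (u ++ w).Sublist pending := by
          rw [hp]
          exact (List.sublist_cons_self s0 w).append_left u
        have hcall := ih (u ++ w) (parts ++ [s0]) (budget - (PySem.Str.len s0 + PySem.Str.len sep)) acc
          (hdesc.sublist hsub)
          (fun s hs => hfit s (hsub.mem hs))
          (by simp)
          (by rw [if_neg (by simp : ¬ parts ++ [s0] = [])]; split_ifs at hfuel <;> simp at hlp ⊢ <;> omega)
        rw [hcall]
        -- identify the two pvTail descriptions
        have hb'le : budget - (PySem.Str.len s0 + PySem.Str.len sep) ≤ budget := by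
          have := pvLenNonneg s0; omega
        have hu' : ∀ s ∈ u, budget - (PySem.Str.len s0 + PySem.Str.len sep) < PySem.Str.len s :=
          fun s hs => lt_of_le_of_lt hb'le (hu s hs)
        have hchunkPd : pvChunkB (PySem.Str.len sep) pending budget
            = (s0 :: (pvChunkB (PySem.Str.len sep) w (budget - (PySem.Str.len s0 + PySem.Str.len sep))).1,
               u ++ (pvChunkB (PySem.Str.len sep) w (budget - (PySem.Str.len s0 + PySem.Str.len sep))).2) := by
          rw [hp, pvChunkB_skip _ u budget hu (s0 :: w), pvChunkB_first _ s0 w budget hs0]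
        have hchunkUW : pvChunkB (PySem.Str.len sep) (u ++ w) (budget - (PySem.Str.len s0 + PySem.Str.len sep))
            = ((pvChunkB (PySem.Str.len sep) w (budget - (PySem.Str.len s0 + PySem.Str.len sep))).1,
               u ++ (pvChunkB (PySem.Str.len sep) w (budget - (PySem.Str.len s0 + PySem.Str.len sep))).2) :=
          pvChunkB_skip _ u _ hu' w
        congr 1
        by_cases huw : u ++ w = []
        · obtain ⟨hu0, hw0⟩ := List.append_eq_nil_iff.mp huw
          subst hu0; subst hw0
          simp only [List.nil_append]
          rw [pvTail_cons _ _ _ _ _ hpd, pvTail_nil, hchunkPd]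
          simp [pvChunkB, pvRef_nil]
        · rw [pvTail_cons _ _ _ _ _ hpd, pvTail_cons _ _ _ _ _ huw]
          rw [hchunkPd, hchunkUW]
          have hwlen := pvChunkB_len (PySem.Str.len sep) w (budget - (PySem.Str.len s0 + PySem.Str.len sep))
          have hmemfit : ∀ x ∈ u ++ (pvChunkB (PySem.Str.len sep) w (budget - (PySem.Str.len s0 + PySem.Str.len sep))).2,
              PySem.Str.len x ≤ L := by
            intro x hx
            rcases List.mem_append.mp hx with hxu | hxw
            · exact hfit x (by rw [hp]; simp [hxu])
            · have hmem := (pvChunkB_kept_sublist (PySem.Str.len sep) w _).mem hxw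
              exact hfit x (by rw [hp]; simp [hmem])
          rw [pvRef_fuel (PySem.Str.len sep) L pending.length _ (u ++ w).length hmemfit
            (by simp only [List.length_append] at hlp ⊢; omega) (by simp only [List.length_append]; omega)]
          simp
      · -- no string fits the current budget: A's 'continue' branch
        push_neg at hex
        have hbis : PySem.List.bisectRight ((pending.map PySem.Str.len).reverse) budget = 0 := by
          apply pvBisect_nofit _ _ hpair
          intro x hx
          rw [List.mem_reverse, List.mem_map] at hx
          obtain ⟨s, hs, rfl⟩ := hx
          exact hex s hs
        rw [hbis]
        rw [if_pos (by norm_num)]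
        have hparts : parts ≠ [] := by
          intro h
          obtain ⟨p0, hp0⟩ := List.exists_mem_of_ne_nil pending hpd
          exact absurd (hfit p0 hp0) (not_le.mpr (hstart h ▸ hex p0 hp0))
        have hcall := ih pending [] L (acc ++ [pvG sep (PySem.Str.len sep) parts]) hdesc hfit
          (fun _ => rfl) (by rw [if_neg hparts] at hfuel; simp only [reduceIte]; omega)
        rw [show pvFlat sep ([] : List String) = [] from by simp [pvFlat]] at hcall
        rw [show (L : Int) + PySem.Str.len sep = L + PySem.Str.len sep from rfl] at hcall
        rw [show (pvG sep (PySem.Str.len sep) parts) =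
              String.ofList (PySem.List.slice (pvFlat sep parts) none (some (-PySem.Str.len sep))) from rfl] at hcall
        rw [hcall]
        -- now identify the two pvTail descriptions
        rw [pvTail, pvTail, if_neg (by simpa [List.isEmpty_iff] using hpd),
            if_neg (by simpa [List.isEmpty_iff] using hpd)]
        rw [pvChunkB_nofit _ _ _ (fun s hs => not_le.mp fun hle => absurd hle (not_le.mpr (hex s hs)))]
        rw [pvRef_step _ _ _ hpd hfit _ (le_refl _)]
        simp [pvG]


-- reduce port A past the guards (both guards pass under Pre_)
theorem pvA_unfold (string_list : List String) (L : Int) (sep : String)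
    (hne : string_list ≠ []) (hfit0 : ∀ s ∈ string_list, PySem.Str.len s ≤ L) :
    join_longest_with_length_limit string_list L sep =
      (if ((PySem.List.sorted string_list (fun s => PySem.Str.len s) false).map PySem.Str.len).sum
            + PySem.Str.len sep * ((PySem.List.sorted string_list (fun s => PySem.Str.len s) false).length : Int)
            ≤ L + PySem.Str.len sep
       then [PySem.Str.join sep (PySem.List.sorted string_list (fun s => PySem.Str.len s) false)]
       else pvLoopA sep (PySem.Str.len sep) (L + PySem.Str.len sep)
              (2 * (PySem.List.sorted string_list (fun s => PySem.Str.len s) false).length + 2)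
              (PySem.List.sorted string_list (fun s => PySem.Str.len s) false)
              ((PySem.List.sorted string_list (fun s => PySem.Str.len s) false).map PySem.Str.len)
              [] (L + PySem.Str.len sep) []) := by
  have hslne : PySem.List.sorted string_list (fun s => PySem.Str.len s) false ≠ [] := by
    intro h
    exact hne ((PySem.List.sorted_eq_nil_iff string_list (fun s => PySem.Str.len s) false).mp h)
  obtain ⟨last, hlast⟩ := Option.isSome_iff_exists.mp
    (by rwa [List.getLast?_isSome] :
      (PySem.List.sorted string_list (fun s => PySem.Str.len s) false).getLast?.isSome = true)
  have hmem : last ∈ PySem.List.sorted string_list (fun s => PySem.Str.len s) false :=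
    List.mem_of_getLast? hlast
  have hlfit : ¬ PySem.Str.len last > L :=
    not_lt.mpr (hfit0 last ((PySem.List.mem_sorted _ _ _ _).mp hmem))
  unfold join_longest_with_length_limit
  simp only [PySem.List.pyGet?_neg_one, hlast, if_neg hlfit]

-- reduce port B past the guards (both guards pass under Pre_)
theorem pvB_unfold (string_list : List String) (L : Int) (sep : String)
    (hne : string_list ≠ []) (hfit0 : ∀ s ∈ string_list, PySem.Str.len s ≤ L) :
    join_longest_with_length_limit_alt string_list L sep =
      (if ((PySem.List.sorted string_list (fun s => PySem.Str.len s) false).map PySem.Str.len).sum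
            + PySem.Str.len sep * (((PySem.List.sorted string_list (fun s => PySem.Str.len s) false).length : Int) - 1)
            ≤ L
       then [PySem.Str.join sep (PySem.List.sorted string_list (fun s => PySem.Str.len s) false)]
       else pvLoopB sep (PySem.Str.len sep) L
              (PySem.List.sorted string_list (fun s => PySem.Str.len s) false).length
              (PySem.List.sorted string_list (fun s => PySem.Str.len s) false) []) := by
  have hslne : PySem.List.sorted string_list (fun s => PySem.Str.len s) false ≠ [] := by
    intro h
    exact hne ((PySem.List.sorted_eq_nil_iff string_list (fun s => PySem.Str.len s) false).mp h)
  obtain ⟨last, hlast⟩ := Option.isSome_iff_exists.mp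
    (by rwa [List.getLast?_isSome] :
      (PySem.List.sorted string_list (fun s => PySem.Str.len s) false).getLast?.isSome = true)
  have hmem : last ∈ PySem.List.sorted string_list (fun s => PySem.Str.len s) false :=
    List.mem_of_getLast? hlast
  have hlfit : ¬ PySem.Str.len last > L :=
    not_lt.mpr (hfit0 last ((PySem.List.mem_sorted _ _ _ _).mp hmem))
  unfold join_longest_with_length_limit_alt
  simp only [PySem.List.pyGet?_neg_one, hlast, if_neg hlfit]

-- ===== VERDICT (by name: the statement is the Claim_ definition above) =====
theorem join_longest_with_length_limit_spec : Claim_unchanged_join_longest_with_length_limit := by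
  intro string_list L sep hdom hpre
  unfold Spec_join_longest_with_length_limit
  intro hnD
  obtain ⟨hne, hfit0⟩ := hpre
  rw [pvA_unfold string_list L sep hne hfit0, pvB_unfold string_list L sep hne hfit0]
  set sl := PySem.List.sorted string_list (fun s => PySem.Str.len s) false with hsl
  have hslne : sl ≠ [] := by
    rw [hsl]; intro h
    exact hne ((PySem.List.sorted_eq_nil_iff string_list (fun s => PySem.Str.len s) false).mp h)
  have hfitsl : ∀ s ∈ sl, PySem.Str.len s ≤ L := by
    intro s hs
    exact hfit0 s ((PySem.List.mem_sorted _ _ _ _).mp (hsl ▸ hs))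
  have hmul : PySem.Str.len sep * ((sl.length : Int) - 1)
      = PySem.Str.len sep * (sl.length : Int) - PySem.Str.len sep := by ring
  have hiff : ((sl.map PySem.Str.len).sum
        + PySem.Str.len sep * ((sl.length : Int) - 1) ≤ L)
      ↔ ((sl.map PySem.Str.len).sum + PySem.Str.len sep * (sl.length : Int) ≤ L + PySem.Str.len sep) := by
    rw [hmul]
    omega
  by_cases hsc : (sl.map PySem.Str.len).sum + PySem.Str.len sep * (sl.length : Int) ≤ L + PySem.Str.len sep
  · rw [if_pos hsc, if_pos (hiff.mpr hsc)]
  · rw [if_neg hsc, if_neg (fun h => hsc (hiff.mp h))]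
    -- the loop case: here the separator cannot be empty (otherwise D_ would hold)
    have hsep : sep ≠ "" := by
      intro h
      subst h
      apply hnD
      refine ⟨rfl, ?_⟩
      have hperm : ((PySem.List.sorted string_list (fun s => PySem.Str.len s) false).map PySem.Str.len).Perm
          (string_list.map PySem.Str.len) :=
        (PySem.List.sorted_perm string_list (fun s => PySem.Str.len s) false).map PySem.Str.len
      have hS : (string_list.map PySem.Str.len).sum = (sl.map PySem.Str.len).sum := by
        rw [hsl]; exact (hperm.sum_eq).symm
      rw [hS]
      have h0 : PySem.Str.len "" = 0 := rfl
      rw [h0] at hsc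
      omega
    have hk : 1 ≤ PySem.Str.len sep := by
      rw [PySem.Str.len_eq]
      have : sep.toList ≠ [] := by simpa [String.toList_eq_nil_iff] using hsep
      have := List.length_pos_iff.mpr this
      omega
    have hdesc : (sl.reverse).Pairwise (fun a b => PySem.Str.len b ≤ PySem.Str.len a) := by
      rw [List.pairwise_reverse, hsl]
      exact PySem.List.sorted_pairwise string_list (fun s => PySem.Str.len s)
    have hfitrev : ∀ s ∈ sl.reverse, PySem.Str.len s ≤ L := by
      intro s hs; exact hfitsl s (List.mem_reverse.mp hs)
    have hrevne : sl.reverse ≠ [] := by simpa using hslne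
    -- A side via the master lemma
    have hA := pvMaster sep L hk (2 * (sl.reverse).length + 2) sl.reverse [] L []
      hdesc hfitrev (fun _ => rfl) (by simp)
    rw [show pvFlat sep ([] : List String) = ([] : List Char) from by simp [pvFlat],
        List.reverse_reverse, show ((sl.reverse).map PySem.Str.len).reverse = sl.map PySem.Str.len from by simp,
        show (sl.reverse).length = sl.length from by simp] at hA
    rw [hA]
    -- B side: bridge the in-place loop to the reference loop, then one pvRef step
    have hascp : sl.Pairwise (fun a b => PySem.Str.len a ≤ PySem.Str.len b) := by
      rw [hsl]
      exact PySem.List.sorted_pairwise string_list (fun s => PySem.Str.len s)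
    rw [pvLoopB_eq_ref sep (PySem.Str.len sep) L sl.length sl [] hascp]
    rw [pvLoopRef_eq sep (PySem.Str.len sep) L sl.length sl.reverse []]
    rw [pvRef_step (PySem.Str.len sep) L sl.reverse hrevne hfitrev _ (by simp)]
    rw [pvTail_cons _ _ _ _ _ hrevne]
    have hfun : pvG sep (PySem.Str.len sep) = PySem.Str.join sep := funext (pvG_eq_join sep hsep)
    rw [hfun]
    simp


theorem join_longest_with_length_limit_changed : Claim_changed_join_longest_with_length_limit := by
  unfold Claim_changed_join_longest_with_length_limit; decide

theorem join_longest_with_length_limit_tight : Claim_exact_join_longest_with_length_limit := by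
  intro string_list L sep hdom hpre hD
  obtain ⟨hne, hfit0⟩ := hpre
  obtain ⟨hsep0, hsum0⟩ := hD
  subst hsep0
  rw [pvA_unfold string_list L "" hne hfit0, pvB_unfold string_list L "" hne hfit0]
  set sl := PySem.List.sorted string_list (fun s => PySem.Str.len s) false with hsl
  have hslne : sl ≠ [] := by
    rw [hsl]; intro h
    exact hne ((PySem.List.sorted_eq_nil_iff string_list (fun s => PySem.Str.len s) false).mp h)
  have hfitsl : ∀ s ∈ sl, PySem.Str.len s ≤ L := by
    intro s hs
    exact hfit0 s ((PySem.List.mem_sorted _ _ _ _).mp (hsl ▸ hs))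
  have hS : (string_list.map PySem.Str.len).sum = (sl.map PySem.Str.len).sum := by
    rw [hsl]
    exact (((PySem.List.sorted_perm string_list (fun s => PySem.Str.len s) false).map PySem.Str.len).sum_eq).symm
  have hk0 : PySem.Str.len "" = 0 := rfl
  rw [hk0]
  rw [hS] at hsum0
  rw [if_neg (by omega), if_neg (by omega)]
  have hdesc : (sl.reverse).Pairwise (fun a b => PySem.Str.len b ≤ PySem.Str.len a) := by
    rw [List.pairwise_reverse, hsl]
    exact PySem.List.sorted_pairwise string_list (fun s => PySem.Str.len s)
  have hfitrev : ∀ s ∈ sl.reverse, PySem.Str.len s ≤ L := by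
    intro s hs; exact hfitsl s (List.mem_reverse.mp hs)
  have hrevne : sl.reverse ≠ [] := by simpa using hslne
  -- A's output is a list of empty strings
  obtain ⟨m, hm⟩ := pvLoopA_empty_sep "" (L + 0) (2 * sl.length + 2) sl (sl.map PySem.Str.len) [] (L + 0) []
  rw [hm, List.nil_append]
  -- B's output starts with a nonempty chunk
  have hascp : sl.Pairwise (fun a b => PySem.Str.len a ≤ PySem.Str.len b) := by
    rw [hsl]
    exact PySem.List.sorted_pairwise string_list (fun s => PySem.Str.len s)
  rw [pvLoopB_eq_ref "" 0 L sl.length sl [] hascp]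
  rw [pvLoopRef_eq "" 0 L sl.length sl.reverse []]
  rw [pvRef_step 0 L sl.reverse hrevne hfitrev _ (by simp)]
  obtain ⟨p0, pr, hpd⟩ := List.exists_cons_of_ne_nil hrevne
  have hp0mem : p0 ∈ sl.reverse := by rw [hpd]; exact List.mem_cons_self
  have hfitp0 : PySem.Str.len p0 ≤ L := hfitrev p0 hp0mem
  have hc1 : (pvChunkB 0 sl.reverse L).1 = p0 :: (pvChunkB 0 pr (L - (PySem.Str.len p0 + 0))).1 := by
    rw [hpd, pvChunkB_first 0 p0 pr L hfitp0]
  -- p0 (the longest string) is nonempty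
  have hmax : ∀ s ∈ sl.reverse, PySem.Str.len s ≤ PySem.Str.len p0 := by
    rw [hpd] at hdesc ⊢
    intro s hs
    rcases List.mem_cons.mp hs with rfl | hs'
    · exact le_refl _
    · exact (List.pairwise_cons.mp hdesc).1 s hs'
  have hp0ne : p0.toList ≠ [] := by
    intro h0
    have hlen0 : PySem.Str.len p0 = 0 := by rw [PySem.Str.len_eq, h0]; rfl
    have hall0 : ∀ x ∈ string_list.map PySem.Str.len, x = 0 := by
      intro x hx
      rw [List.mem_map] at hx
      obtain ⟨s, hs, rfl⟩ := hx
      have h1 : PySem.Str.len s ≤ 0 := by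
        have : s ∈ sl.reverse := by
          rw [List.mem_reverse, hsl, PySem.List.mem_sorted]; exact hs
        have := hmax s this; omega
      have h2 := pvLenNonneg s
      omega
    have : (string_list.map PySem.Str.len).sum = 0 := List.sum_eq_zero hall0
    rw [hS] at this
    have hL0 : 0 ≤ L := le_trans (pvLenNonneg p0) hfitp0
    omega
  have hjne : PySem.Str.join "" (pvChunkB 0 sl.reverse L).1 ≠ "" := by
    intro hj
    have htl : (PySem.Str.join "" (pvChunkB 0 sl.reverse L).1).toList = [] := by rw [hj]; rfl
    rw [PySem.Str.toList_join, hc1] at htl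
    cases hcc : (pvChunkB 0 pr (L - (PySem.Str.len p0 + 0))).1 with
    | nil =>
      rw [hcc] at htl
      rw [show List.map String.toList [p0] = [p0.toList] from rfl, PySem.Chars.join_singleton] at htl
      exact hp0ne htl
    | cons c cs =>
      rw [hcc, List.map_cons, List.map_cons, PySem.Chars.join_cons_cons] at htl
      rcases List.append_eq_nil_iff.mp htl with ⟨h1, _⟩
      rcases List.append_eq_nil_iff.mp h1 with ⟨h2, _⟩
      exact hp0ne h2
  intro heq
  apply hjne
  have hjm : PySem.Str.join "" (pvChunkB 0 sl.reverse L).1 ∈ List.replicate m "" := by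
    rw [heq, List.map_cons]
    exact List.mem_cons_self
  exact List.eq_of_mem_replicate hjm
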